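-- pv_equiv track=rewrite | github.com/paulzim/shinobi_no_fude | scribe/text_seam.py | _extract_glossary_extractions
-- ===== SOURCE A (Python) =====
-- from typing import Any, Dict, Iterable, List, Tuple
--
-- GLOSSARY_SKIP_FIELDS = {
--     "aliases",
--     "type",
--     "translation",
--     "focus",
--     "weapons",
--     "key points",
--     "notes",
--     "ranks",
--     "kamae",
--     "core actions",
--     "modes",
--     "throws",
--     "range",
--     "safety/drill",
--     "school",
--     "weapon",
-- }
--
-- def _clean_line(line: str) -> str:
--     return " ".join((line or "").strip().split())
--
-- def _clip(text: str, max_len: int = 140) -> str: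
--     text = _clean_line(text)
--     if len(text) <= max_len:
--         return text
--     return text[: max_len - 3].rstrip() + "..."
--
-- def _append_unique(items: List[str], seen: set[str], value: str) -> None:
--     value = _clean_line(value)
--     if not value:
--         return
--     folded = value.lower()
--     if folded in seen:
--         return
--     items.append(value)
--     seen.add(folded)
--
-- def _extract_glossary_extractions(text: str) -> Tuple[List[str], List[str]]:
--     titles: List[str] = []
--     title_seen: set[str] = set()
--     anchors: List[str] = []
--     anchor_seen: set[str] = set()
--
--     for raw in text.splitlines():
--         line = _clean_line(raw)
--         if not line or ":" not in line:
--             continue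
--         term, value = line.split(":", 1)
--         term = _clean_line(term)
--         value = _clean_line(value)
--         if not term or not value or len(term) > 50:
--             continue
--         if term.lower() in GLOSSARY_SKIP_FIELDS:
--             continue
--         _append_unique(titles, title_seen, term)
--         _append_unique(anchors, anchor_seen, _clip(f"{term}: {value}"))
--
--     return titles[:4], anchors[:5]
-- ===== SOURCE B (Python) =====
-- from typing import List, Optional, Tuple
--
-- GLOSSARY_SKIP_FIELDS = {
--     "aliases", "type", "translation", "focus", "weapons", "key points",
--     "notes", "ranks", "kamae", "core actions", "modes", "throws",
--     "range", "safety/drill", "school", "weapon",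
-- }
--
-- def _clean_line(line: str) -> str:
--     return " ".join((line or "").strip().split())
--
-- def _clip(text: str, max_len: int = 140) -> str:
--     text = _clean_line(text)
--     if len(text) <= max_len:
--         return text
--     return text[: max_len - 3].rstrip() + "..."
--
-- def _parse_line(raw: str) -> Optional[Tuple[str, str]]:
--     line = _clean_line(raw)
--     if not line or ":" not in line:
--         return None
--     term, value = line.split(":", 1)
--     term = _clean_line(term)
--     value = _clean_line(value)
--     if not term or not value or len(term) > 50:
--         return None
--     if term.lower() in GLOSSARY_SKIP_FIELDS:
--         return None
--     return term, _clip(f"{term}: {value}")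
--
-- def _dedup_ci(values: List[str]) -> List[str]:
--     keep = {}
--     for v in values:
--         v = _clean_line(v)
--         if v and v.lower() not in keep:
--             keep[v.lower()] = v
--     return list(keep.values())
--
-- def _extract_glossary_extractions(text: str) -> Tuple[List[str], List[str]]:
--     pairs = [p for p in map(_parse_line, text.splitlines()) if p is not None]
--     titles = _dedup_ci([t for t, _ in pairs])
--     anchors = _dedup_ci([a for _, a in pairs])
--     return titles[:4], anchors[:5]
-- ===== Notes on version B (the rewrite author's own statement) =====
-- stated objective: alternative
-- what changed: Single interleaved loop threading four accumulators (two lists + two seen-sets with a mutating append-unique helper) is replaced by a two-phase pipeline: a pure parsing pass producing (term, anchor) pairs, then two independent dict-based case-insensitive dedup passes (lowercased key -> first original value, list(dict.values())).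
import Mathlib
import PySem

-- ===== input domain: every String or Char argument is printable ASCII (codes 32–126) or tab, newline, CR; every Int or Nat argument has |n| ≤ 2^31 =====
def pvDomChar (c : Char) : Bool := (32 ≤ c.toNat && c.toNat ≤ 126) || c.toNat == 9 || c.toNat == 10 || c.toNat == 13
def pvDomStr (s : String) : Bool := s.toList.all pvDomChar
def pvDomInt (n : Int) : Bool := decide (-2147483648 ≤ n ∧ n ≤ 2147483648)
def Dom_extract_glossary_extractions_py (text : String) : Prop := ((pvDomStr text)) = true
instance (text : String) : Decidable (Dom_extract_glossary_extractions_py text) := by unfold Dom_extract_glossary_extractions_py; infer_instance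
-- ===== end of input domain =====

-- B replaces A's single interleaved loop over four accumulators by a parsing pass producing
-- (term, anchor) pairs followed by two independent dict-based case-insensitive dedup passes.

-- ===== PORT A =====
-- GLOSSARY_SKIP_FIELDS (a module-level set literal, shared by both implementations)
def pvSkipFields : PySem.Set String := PySem.Set.ofList
  ["aliases", "type", "translation", "focus", "weapons", "key points", "notes", "ranks",
   "kamae", "core actions", "modes", "throws", "range", "safety/drill", "school", "weapon"]

-- _clean_line (shared helper): " ".join((line or "").strip().split())
def pvClean (line : String) : String :=
  PySem.Str.join " " (PySem.Str.split₀ (PySem.Str.strip line))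

-- _clip (shared helper)
def pvClip (text : String) (maxLen : Int) : String :=
  let text := pvClean text
  if PySem.Str.len text ≤ maxLen then text
  else PySem.Str.rstrip (PySem.Str.slice text none (some (maxLen - 3))) ++ "..."

-- _append_unique (mutates items/seen in Python; here returns the updated pair)
def pvAppendUnique (items : List String) (seen : PySem.Set String) (value : String) :
    List String × PySem.Set String :=
  let value := pvClean value
  if value == "" then (items, seen)
  else
    let folded := PySem.Str.lower value
    if PySem.Set.contains seen folded then (items, seen)
    else (items ++ [value], PySem.Set.add seen folded)

-- the body of A's 'for raw in text.splitlines()' loop, state ((titles, title_seen), (anchors, anchor_seen))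
def pvStepA (st : (List String × PySem.Set String) × (List String × PySem.Set String))
    (raw : String) : (List String × PySem.Set String) × (List String × PySem.Set String) :=
  let line := pvClean raw
  if line == "" || !(PySem.Str.isIn ":" line) then st
  else
    match PySem.Str.splitMax? line ":" 1 with
    | some [t0, v0] =>
      let term := pvClean t0
      let value := pvClean v0
      if term == "" || value == "" || decide (50 < PySem.Str.len term) then st
      else if PySem.Set.contains pvSkipFields (PySem.Str.lower term) then st
      else
        (((pvAppendUnique st.1.1 st.1.2 term).1, (pvAppendUnique st.1.1 st.1.2 term).2),
         ((pvAppendUnique st.2.1 st.2.2 (pvClip (term ++ ": " ++ value) 140)).1,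
          (pvAppendUnique st.2.1 st.2.2 (pvClip (term ++ ": " ++ value) 140)).2))
    | _ => st  -- unreachable: split(":", 1) with ":" in line always yields exactly two parts

def extract_glossary_extractions_py (text : String) : List String × List String :=
  let st := (PySem.Str.splitlines text).foldl pvStepA
    (([], PySem.Set.empty), ([], PySem.Set.empty))
  (PySem.List.slice st.1.1 none (some 4), PySem.List.slice st.2.1 none (some 5))

-- ===== PORT B =====
-- _parse_line: clean, reject, split on the first ':', return (term, clipped anchor)
def pvParseLine (raw : String) : Option (String × String) :=
  let line := pvClean raw
  if line == "" || !(PySem.Str.isIn ":" line) then none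
  else
    match PySem.Str.splitMax? line ":" 1 with
    | some [t0, v0] =>
      let term := pvClean t0
      let value := pvClean v0
      if term == "" || value == "" || decide (50 < PySem.Str.len term) then none
      else if PySem.Set.contains pvSkipFields (PySem.Str.lower term) then none
      else some (term, pvClip (term ++ ": " ++ value) 140)
    | _ => none  -- unreachable: split(":", 1) with ":" in line always yields exactly two parts

-- _dedup_ci: dict keyed by the lowercased value, first original kept; list(keep.values())
def pvDedupCI (values : List String) : List String :=
  (values.foldl (fun keep v =>
      let v := pvClean v
      if v == "" then keep
      else if PySem.Dict.contains keep (PySem.Str.lower v) then keep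
      else keep.insert (PySem.Str.lower v) v)
    PySem.Dict.empty).values

def extract_glossary_extractions_py_alt (text : String) : List String × List String :=
  let pairs := (PySem.Str.splitlines text).filterMap pvParseLine
  let titles := pvDedupCI (pairs.map (fun p => p.1))
  let anchors := pvDedupCI (pairs.map (fun p => p.2))
  (PySem.List.slice titles none (some 4), PySem.List.slice anchors none (some 5))

-- ===== PRECONDITION & SPEC =====
def Spec_extract_glossary_extractions_py (text : String) (out : List String × List String) : Prop := out = extract_glossary_extractions_py_alt text
instance (text : String) (out : List String × List String) : Decidable (Spec_extract_glossary_extractions_py text out) := by unfold Spec_extract_glossary_extractions_py; infer_instance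

-- ===== CLAIM (what is proved, stated in full; the proofs are below) =====
def Claim_equal_extract_glossary_extractions_py : Prop := ∀ (text : String), Dom_extract_glossary_extractions_py text → Spec_extract_glossary_extractions_py text (extract_glossary_extractions_py text)

-- ===== LEMMAS AND PROOFS =====

-- A's loop body is: parse the line; on failure keep the state, on success append-unique both streams.
theorem pvStepA_eq_parse (st : (List String × PySem.Set String) × (List String × PySem.Set String))
    (raw : String) :
    pvStepA st raw = match pvParseLine raw with
      | none => st
      | some p => (pvAppendUnique st.1.1 st.1.2 p.1, pvAppendUnique st.2.1 st.2.2 p.2) := by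
  unfold pvStepA pvParseLine
  generalize pvClean raw = line
  cases h1 : (line == "" || !(PySem.Str.isIn ":" line)) with
  | true => simp only [h1, if_true]
  | false =>
    simp only [h1, Bool.false_eq_true, reduceIte]
    generalize PySem.Str.splitMax? line ":" 1 = r
    match r with
    | none => rfl
    | some [] => rfl
    | some [t0] => rfl
    | some (t0 :: v0 :: x :: rest) => rfl
    | some [t0, v0] =>
      simp only
      generalize pvClean t0 = term
      generalize pvClean v0 = value
      cases h3 : (term == "" || value == "" || decide (50 < PySem.Str.len term)) with
      | true => simp only [if_true]
      | false =>
        simp only [Bool.false_eq_true, reduceIte]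
        cases h4 : PySem.Set.contains pvSkipFields (PySem.Str.lower term) with
        | true => simp only [if_true]
        | false => simp only [Bool.false_eq_true, reduceIte]

-- A's loop is the pair-updating fold over the successfully parsed lines
theorem stepA_foldl_eq (l : List String) :
    ∀ st, l.foldl pvStepA st = (l.filterMap pvParseLine).foldl
      (fun st p => (pvAppendUnique st.1.1 st.1.2 p.1, pvAppendUnique st.2.1 st.2.2 p.2)) st := by
  induction l with
  | nil => intro st; rfl
  | cons a t ih =>
    intro st
    rw [List.foldl_cons, List.filterMap_cons, pvStepA_eq_parse]
    cases hg : pvParseLine a with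
    | none =>
      show List.foldl pvStepA st t = List.foldl _ st (List.filterMap pvParseLine t)
      exact ih st
    | some b =>
      show List.foldl pvStepA (pvAppendUnique st.1.1 st.1.2 b.1, pvAppendUnique st.2.1 st.2.2 b.2) t
        = List.foldl _ st (b :: List.filterMap pvParseLine t)
      rw [List.foldl_cons]
      exact ih _

-- membership in a Python set after .add, as a Bool equation
theorem set_contains_add (s : PySem.Set String) (x y : String) :
    PySem.Set.contains (PySem.Set.add s x) y = (y == x || PySem.Set.contains s y) := by
  rw [Bool.eq_iff_iff, PySem.Set.contains_iff, PySem.Set.mem_add]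
  simp [or_comm]

-- the append-unique fold and the dict-based dedup fold stay in lockstep:
-- items is the dict's value list and seen holds exactly the dict's keys
theorem appendUnique_foldl_eq_dict (vs : List String) :
    ∀ (items : List String) (seen : PySem.Set String) (d : PySem.Dict String String),
    (∀ k, PySem.Set.contains seen k = d.contains k) → items = d.values →
    (vs.foldl (fun s v => pvAppendUnique s.1 s.2 v) (items, seen)).1 =
    (vs.foldl (fun keep v =>
        let v := pvClean v
        if v == "" then keep
        else if PySem.Dict.contains keep (PySem.Str.lower v) then keep
        else keep.insert (PySem.Str.lower v) v) d).values := by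
  induction vs with
  | nil => intro items seen d _ hv; simpa using hv
  | cons v t ih =>
    intro items seen d hk hv
    simp only [List.foldl_cons]
    show (List.foldl (fun s v => pvAppendUnique s.1 s.2 v)
        (let w := pvClean v;
         if w == "" then (items, seen)
         else if PySem.Set.contains seen (PySem.Str.lower w) then (items, seen)
         else (items ++ [w], PySem.Set.add seen (PySem.Str.lower w))) t).1 =
      (List.foldl (fun keep v =>
          let v := pvClean v
          if v == "" then keep
          else if PySem.Dict.contains keep (PySem.Str.lower v) then keep
          else keep.insert (PySem.Str.lower v) v)
        (let w := pvClean v;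
         if w == "" then d
         else if PySem.Dict.contains d (PySem.Str.lower w) then d
         else d.insert (PySem.Str.lower w) w) t).values
    generalize pvClean v = w
    cases h0 : (w == "") with
    | true =>
      simp only [h0, reduceIte]
      exact ih items seen d hk hv
    | false =>
      simp only [h0, Bool.false_eq_true, reduceIte]
      cases hc : PySem.Set.contains seen (PySem.Str.lower w) with
      | true =>
        have hc2 : PySem.Dict.contains d (PySem.Str.lower w) = true := (hk _).symm.trans hc
        simp only [hc2, reduceIte]
        exact ih items seen d hk hv
      | false =>
        have hc2 : PySem.Dict.contains d (PySem.Str.lower w) = false := (hk _).symm.trans hc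
        simp only [hc2, Bool.false_eq_true, reduceIte]
        apply ih
        · intro k
          rw [PySem.Dict.contains_insert, set_contains_add, hk]
        · rw [hv]
          simp only [PySem.Dict.values]
          rw [PySem.Dict.items_insert_of_not_contains _ _ hc2]
          simp

theorem dedup_fold_components (ps : List (String × String)) (pick : String × String → String) :
    (ps.foldl (fun s p => pvAppendUnique s.1 s.2 (pick p)) ([], PySem.Set.empty)).1 =
    pvDedupCI (ps.map pick) := by
  unfold pvDedupCI
  rw [← List.foldl_map (f := pick) (g := fun s v => pvAppendUnique s.1 s.2 v)]
  exact appendUnique_foldl_eq_dict (ps.map pick) [] PySem.Set.empty PySem.Dict.empty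
    (fun k => rfl) rfl

-- ===== VERDICT (by name: the statement is the Claim_ definition above) =====
theorem extract_glossary_extractions_py_spec : Claim_equal_extract_glossary_extractions_py := by
  intro text _
  show extract_glossary_extractions_py text = extract_glossary_extractions_py_alt text
  have hfold : (PySem.Str.splitlines text).foldl pvStepA (([], PySem.Set.empty), ([], PySem.Set.empty))
      = ((((PySem.Str.splitlines text).filterMap pvParseLine).foldl
            (fun s p => pvAppendUnique s.1 s.2 p.1) ([], PySem.Set.empty)),
         (((PySem.Str.splitlines text).filterMap pvParseLine).foldl
            (fun s p => pvAppendUnique s.1 s.2 p.2) ([], PySem.Set.empty))) := by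
    rw [stepA_foldl_eq]
    have h := PySem.List.foldl_prod_mk
      (f := fun (s : List String × PySem.Set String) (p : String × String) => pvAppendUnique s.1 s.2 p.1)
      (g := fun (s : List String × PySem.Set String) (p : String × String) => pvAppendUnique s.1 s.2 p.2)
      (List.filterMap pvParseLine (PySem.Str.splitlines text))
      ([], PySem.Set.empty) ([], PySem.Set.empty)
    exact h
  calc extract_glossary_extractions_py text
      = (PySem.List.slice ((PySem.Str.splitlines text).foldl pvStepA
            (([], PySem.Set.empty), ([], PySem.Set.empty))).1.1 none (some 4),
         PySem.List.slice ((PySem.Str.splitlines text).foldl pvStepA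
            (([], PySem.Set.empty), ([], PySem.Set.empty))).2.1 none (some 5)) := rfl
    _ = (PySem.List.slice (pvDedupCI (((PySem.Str.splitlines text).filterMap pvParseLine).map
            (fun p => p.1))) none (some 4),
         PySem.List.slice (pvDedupCI (((PySem.Str.splitlines text).filterMap pvParseLine).map
            (fun p => p.2))) none (some 5)) := by
          rw [hfold]
          rw [dedup_fold_components _ (fun p => p.1), dedup_fold_components _ (fun p => p.2)]
    _ = extract_glossary_extractions_py_alt text := rfl
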